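-- pv_equiv track=rewrite | github.com/pedroafmonteiro/fp-leic | Week 05 (October 16 - October 22)/Practice 05/QP05 Quiz - Strings & Tuples/exercise4.py | multi
-- ===== SOURCE A (Python) =====
-- def multi(g):
--     g =  sorted(g)
--     wait = 0
--     display = ()
--     for z in range(len(g)):
--         if wait > 0:
--             wait -= 1
--             continue
--         t = g[z]
--         n = 1
--         for i in range(len(g)):
--             if i!= z and t[0] == g[i][0] and t[1] == g[i][1]:
--                 n += 1
--         wait = n - 1
--         display = display + ((t[0], n, t[1]),)
--     return display
-- ===== SOURCE B (Python) =====
-- def multi(g):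
--     s = sorted(g)
--     out = []
--     i = 0
--     n = len(s)
--     while i < n:
--         j = i + 1
--         while j < n and s[j] == s[i]:
--             j += 1
--         out.append((s[i][0], j - i, s[i][1]))
--         i = j
--     return tuple(out)
-- ===== Notes on version B (the rewrite author's own statement) =====
-- stated objective: faster
-- what changed: Instead of counting each group's occurrences with a full inner scan and a wait-counter that skips the duplicates, B makes a single linear pass over the sorted list, advancing a second index to the end of each contiguous run of equal pairs.
import Mathlib
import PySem

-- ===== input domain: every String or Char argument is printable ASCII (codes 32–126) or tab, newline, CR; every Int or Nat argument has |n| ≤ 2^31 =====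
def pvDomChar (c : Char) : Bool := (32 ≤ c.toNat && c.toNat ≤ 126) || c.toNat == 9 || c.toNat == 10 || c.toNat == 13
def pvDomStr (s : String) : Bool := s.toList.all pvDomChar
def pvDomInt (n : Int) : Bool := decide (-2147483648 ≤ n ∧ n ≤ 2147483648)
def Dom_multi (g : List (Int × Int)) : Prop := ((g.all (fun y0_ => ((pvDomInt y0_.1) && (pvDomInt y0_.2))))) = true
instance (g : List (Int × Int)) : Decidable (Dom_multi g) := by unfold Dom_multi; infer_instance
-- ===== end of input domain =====

-- B replaces A's quadratic count-and-skip over the sorted list by one linear grouping pass (two indices over contiguous runs).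

-- ===== PORT A =====
-- loop body of A's 'for z in range(len(g))' (state = (wait, display)); g[z]/g[i] are always
-- in range here, so pyGetD with an arbitrary default is exact
def multiBody (s : List (Int × Int)) (st : Int × List (Int × Int × Int)) (z : Int) :
    Int × List (Int × Int × Int) :=
  if st.1 > 0 then (st.1 - 1, st.2)
  else
    let t := PySem.List.pyGetD s z (0, 0)
    let n := (PySem.List.pyRange 0 (PySem.List.len s) 1).foldl
        (fun n i =>
          if i ≠ z ∧ t.1 = (PySem.List.pyGetD s i (0, 0)).1 ∧ t.2 = (PySem.List.pyGetD s i (0, 0)).2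
          then n + 1 else n) 1
    (n - 1, st.2 ++ [(t.1, n, t.2)])

def multi (g : List (Int × Int)) : List (Int × Int × Int) :=
  let s := PySem.List.sorted2 g Prod.fst Prod.snd
  ((PySem.List.pyRange 0 (PySem.List.len s) 1).foldl (multiBody s) (0, [])).2

-- ===== PORT B =====
-- inner 'while j < n and s[j] == s[i]: j += 1' of Source B; indices in range, getD is exact
def runEnd (s : List (Int × Int)) (i j : Nat) : Nat :=
  if h : j < s.length ∧ s.getD j (0, 0) = s.getD i (0, 0) then runEnd s i (j + 1) else j
termination_by s.length - j
decreasing_by omega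

-- needed by bLoop's termination proof
theorem le_runEnd (s : List (Int × Int)) (i j : Nat) : j ≤ runEnd s i j := by
  fun_induction runEnd with
  | case1 h ih => omega
  | case2 => omega

-- outer 'while i < n' of Source B
def bLoop (s : List (Int × Int)) (i : Nat) : List (Int × Int × Int) :=
  if _hi : i < s.length then
    let j := runEnd s i (i + 1)
    let t := s.getD i (0, 0)
    (t.1, (j : Int) - (i : Int), t.2) :: bLoop s j
  else []
termination_by s.length - i
decreasing_by have := le_runEnd s i (i + 1); omega

def multi_alt (g : List (Int × Int)) : List (Int × Int × Int) :=
  bLoop (PySem.List.sorted2 g Prod.fst Prod.snd) 0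

-- ===== PRECONDITION & SPEC =====
def Spec_multi (g : List (Int × Int)) (out : List (Int × Int × Int)) : Prop := out = multi_alt g
instance (g : List (Int × Int)) (out : List (Int × Int × Int)) : Decidable (Spec_multi g out) := by unfold Spec_multi; infer_instance

-- ===== CLAIM (what is proved, stated in full; the proofs are below) =====
def Claim_equal_multi : Prop := ∀ (g : List (Int × Int)), Dom_multi g → Spec_multi g (multi g)

-- ===== LEMMAS AND PROOFS =====

theorem sorted2_eq_sorted_lex (xs : List (Int × Int)) :
    PySem.List.sorted2 xs Prod.fst Prod.snd = PySem.List.sorted xs (fun x => toLex x) := by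
  rw [PySem.List.sorted_eq_foldl_insertBy]
  show List.foldl _ [] xs = _
  congr 1
  funext acc x
  congr 1
  funext a b
  have : (toLex a < toLex b) ↔ (a.1 < b.1 ∨ a.1 = b.1 ∧ a.2 < b.2) := Prod.Lex.lt_iff
  by_cases h1 : a.1 < b.1 <;> by_cases h2 : b.1 < a.1 <;> by_cases h3 : a.2 < b.2 <;>
    simp [this, h1, h2, h3] <;> omega

theorem getD_mono {s : List (Int × Int)}
    (Hs : s.Pairwise (fun a b => toLex a ≤ toLex b)) {p q : Nat}
    (hpq : p ≤ q) (hq : q < s.length) :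
    toLex (s.getD p (0, 0)) ≤ toLex (s.getD q (0, 0)) := by
  rcases Nat.lt_or_ge p q with h | h
  · have := List.pairwise_iff_getElem.mp Hs p q (by omega) hq h
    rwa [List.getD_eq_getElem s _ (by omega), List.getD_eq_getElem s _ hq]
  · have : p = q := by omega
    subst this; exact le_refl _

theorem runEnd_le (s : List (Int × Int)) (i j : Nat) (hj : j ≤ s.length) :
    runEnd s i j ≤ s.length := by
  fun_induction runEnd with
  | case1 hj h ih => exact ih (by omega)
  | case2 hj h => omega

theorem runEnd_eq_self (s : List (Int × Int)) (i j : Nat) :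
    ∀ k, j ≤ k → k < runEnd s i j → s.getD k (0, 0) = s.getD i (0, 0) := by
  fun_induction runEnd with
  | case1 j h ih =>
    intro k h1 h2
    rcases Nat.eq_or_lt_of_le h1 with rfl | hlt
    · exact h.2
    · exact ih k (by omega) h2
  | case2 j h =>
    intro k h1 h2
    omega

theorem runEnd_stop (s : List (Int × Int)) (i j : Nat) :
    runEnd s i j < s.length → s.getD (runEnd s i j) (0, 0) ≠ s.getD i (0, 0) := by
  fun_induction runEnd with
  | case1 j h ih => exact ih
  | case2 j h =>
    intro _ he
    exact h ⟨by omega, he⟩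


theorem skip_lemma (s : List (Int × Int)) (k : Nat) :
    ∀ (z : Int) (acc : List (Int × Int × Int)),
    (PySem.List.pyRange z (z + k) 1).foldl (multiBody s) ((k : Int), acc) = (0, acc) := by
  induction k with
  | zero =>
    intro z acc
    rw [PySem.List.pyRange_one_eq_nil (by omega)]
    simp
  | succ k ih =>
    intro z acc
    rw [PySem.List.pyRange_one_cons (by omega)]
    simp only [List.foldl_cons]
    have hb : multiBody s (((k+1 : Nat) : Int), acc) z = (((k : Nat) : Int), acc) := by
      simp only [multiBody]
      rw [if_pos (by push_cast; omega)]
      simp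
    rw [hb]
    have hr : z + ((k + 1 : Nat) : Int) = (z + 1) + (k : Nat) := by push_cast; ring
    rw [hr]
    exact ih (z + 1) acc

theorem inner_count (s : List (Int × Int))
    (Hs : s.Pairwise (fun a b => toLex a ≤ toLex b)) (z : Nat) (hz : z < s.length)
    (hb : ∀ k, k < z → s.getD k (0, 0) ≠ s.getD z (0, 0)) :
    (PySem.List.pyRange 0 (s.length : Int) 1).foldl
        (fun n i =>
          if i ≠ (z : Int) ∧ (s.getD z (0, 0)).1 = (PySem.List.pyGetD s i (0, 0)).1 ∧
              (s.getD z (0, 0)).2 = (PySem.List.pyGetD s i (0, 0)).2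
          then n + 1 else n) 1 = ((runEnd s z (z + 1) : Int) - (z : Int)) := by
  set t := s.getD z (0, 0) with ht
  set j := runEnd s z (z + 1) with hj
  have hj1 : z + 1 ≤ j := le_runEnd s z (z + 1)
  have hj2 : j ≤ s.length := runEnd_le s z (z + 1) (by omega)
  -- the loop condition as a Bool predicate
  set p : Int → Bool := fun i =>
    decide (i ≠ (z : Int) ∧ t.1 = (PySem.List.pyGetD s i (0, 0)).1 ∧
      t.2 = (PySem.List.pyGetD s i (0, 0)).2) with hp
  have hfun : (fun (n : Int) (i : Int) =>
      if i ≠ (z : Int) ∧ t.1 = (PySem.List.pyGetD s i (0, 0)).1 ∧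
          t.2 = (PySem.List.pyGetD s i (0, 0)).2
      then n + 1 else n) = (fun (n : Int) (i : Int) => if p i = true then n + 1 else n) := by
    funext n i
    by_cases h : i ≠ (z : Int) ∧ t.1 = (PySem.List.pyGetD s i (0, 0)).1 ∧
        t.2 = (PySem.List.pyGetD s i (0, 0)).2 <;> simp [hp, h]
  rw [hfun, PySem.List.foldl_count_if]
  set q : Int → Bool := fun i => decide ((z : Int) < i ∧ i < (j : Int)) with hq
  have hcong : List.countP p (PySem.List.pyRange 0 (s.length : Int) 1)
      = List.countP q (PySem.List.pyRange 0 (s.length : Int) 1) := by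
    apply List.countP_congr
    intro i hi
    have hib := PySem.List.mem_pyRange_one.mp hi
    set m := i.toNat with hm
    have him : i = (m : Int) := by omega
    have hmlen : m < s.length := by omega
    have hget : PySem.List.pyGetD s i (0, 0) = s.getD m (0, 0) :=
      PySem.List.pyGetD_of_nonneg s (0, 0) (by omega)
    simp only [hp, hq, hget, decide_eq_true_eq]
    constructor
    · rintro ⟨hne, he1, he2⟩
      have heq : s.getD m (0, 0) = t := Prod.ext he1.symm he2.symm
      have hmz : m ≠ z := by omega
      rcases Nat.lt_or_ge m z with hlt | hge
      · exact absurd heq (hb m hlt)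
      · have hzm : z < m := by omega
        constructor
        · omega
        · by_contra hcon
          have hjm : j ≤ m := by omega
          have hjlen : j < s.length := by omega
          have hstop : s.getD j (0, 0) ≠ t := runEnd_stop s z (z + 1) (by omega)
          have h1 : toLex t ≤ toLex (s.getD j (0, 0)) := ht ▸ getD_mono Hs (by omega) hjlen
          have h2 : toLex (s.getD j (0, 0)) ≤ toLex (s.getD m (0, 0)) := getD_mono Hs hjm hmlen
          rw [heq] at h2
          exact hstop (toLex.injective (le_antisymm h2 h1))
    · rintro ⟨h1, h2⟩
      have heq : s.getD m (0, 0) = t :=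
        runEnd_eq_self s z (z + 1) m (by omega) (by omega)
      refine ⟨by omega, ?_, ?_⟩ <;> rw [heq]
  rw [hcong]
  have hsplit : PySem.List.pyRange 0 (s.length : Int) 1
      = PySem.List.pyRange 0 ((z : Int) + 1) 1 ++ PySem.List.pyRange ((z : Int) + 1) (j : Int) 1
        ++ PySem.List.pyRange (j : Int) (s.length : Int) 1 := by
    rw [PySem.List.pyRange_one_append 0 ((z : Int) + 1) (s.length : Int) (by omega) (by omega),
      PySem.List.pyRange_one_append ((z : Int) + 1) (j : Int) (s.length : Int) (by omega) (by omega),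
      List.append_assoc]
  rw [hsplit, List.countP_append, List.countP_append]
  have c1 : List.countP q (PySem.List.pyRange 0 ((z : Int) + 1) 1) = 0 := by
    rw [List.countP_eq_zero]
    intro a ha
    have := PySem.List.mem_pyRange_one.mp ha
    simp only [hq, decide_eq_true_eq]
    omega
  have c2 : List.countP q (PySem.List.pyRange ((z : Int) + 1) (j : Int) 1)
      = (PySem.List.pyRange ((z : Int) + 1) (j : Int) 1).length := by
    rw [List.countP_eq_length]
    intro a ha
    have := PySem.List.mem_pyRange_one.mp ha
    simp only [hq, decide_eq_true_eq]
    omega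
  have c3 : List.countP q (PySem.List.pyRange (j : Int) (s.length : Int) 1) = 0 := by
    rw [List.countP_eq_zero]
    intro a ha
    have := PySem.List.mem_pyRange_one.mp ha
    simp only [hq, decide_eq_true_eq]
    omega
  rw [c1, c2, c3, PySem.List.length_pyRange_one]
  omega

theorem outer_eq (s : List (Int × Int))
    (Hs : s.Pairwise (fun a b => toLex a ≤ toLex b)) :
    ∀ (fuel z : Nat) (acc : List (Int × Int × Int)),
    s.length ≤ z + fuel → z ≤ s.length →
    (z < s.length → ∀ k, k < z → s.getD k (0, 0) ≠ s.getD z (0, 0)) →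
    (PySem.List.pyRange (z : Int) (s.length : Int) 1).foldl (multiBody s) (0, acc)
      = (0, acc ++ bLoop s z) := by
  intro fuel
  induction fuel with
  | zero =>
    intro z acc h1 h2 hb
    have hz : z = s.length := by omega
    subst hz
    rw [PySem.List.pyRange_one_eq_nil (by omega), bLoop]
    simp
  | succ fuel ih =>
    intro z acc h1 h2 hb
    rcases Nat.eq_or_lt_of_le h2 with hz | hzlt
    · subst hz
      rw [PySem.List.pyRange_one_eq_nil (by omega), bLoop]
      simp
    · set t := s.getD z (0, 0) with ht
      set j := runEnd s z (z + 1) with hj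
      have hj1 : z + 1 ≤ j := le_runEnd s z (z + 1)
      have hj2 : j ≤ s.length := runEnd_le s z (z + 1) (by omega)
      have htg : PySem.List.pyGetD s ((z : Nat) : Int) (0, 0) = t := by
        rw [PySem.List.pyGetD_of_nonneg s (0, 0) (by omega)]
        simp [ht, List.getD]
      have hstep : multiBody s (0, acc) ((z : Nat) : Int)
          = (((j : Int) - (z : Int)) - 1, acc ++ [(t.1, (j : Int) - (z : Int), t.2)]) := by
        simp only [multiBody]
        rw [if_neg (by simp)]
        simp only [htg, PySem.List.len_eq]
        rw [inner_count s Hs z hzlt (hb hzlt)]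
      rw [PySem.List.pyRange_one_cons (by exact_mod_cast Nat.cast_lt.mpr hzlt)]
      simp only [List.foldl_cons]
      rw [hstep]
      rw [PySem.List.pyRange_one_append ((z : Int) + 1) (j : Int) (s.length : Int)
        (by omega) (by omega), List.foldl_append]
      have hcast : (((j - (z + 1) : Nat) : Int)) = (j : Int) - (z : Int) - 1 := by omega
      have hskip := skip_lemma s (j - (z + 1)) ((z : Int) + 1) (acc ++ [(t.1, (j : Int) - (z : Int), t.2)])
      have hrange : ((z : Int) + 1) + ((j - (z + 1) : Nat) : Int) = (j : Int) := by omega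
      rw [hrange, hcast] at hskip
      rw [hskip]
      have hbj : j < s.length → ∀ k, k < j → s.getD k (0, 0) ≠ s.getD j (0, 0) := by
        intro hjlen k hk
        have hstop : s.getD j (0, 0) ≠ t := runEnd_stop s z (z + 1) (by omega)
        rcases Nat.lt_trichotomy k z with hkz | hkz | hkz
        · have hkne : s.getD k (0, 0) ≠ t := hb hzlt k hkz
          have hle1 : toLex (s.getD k (0, 0)) ≤ toLex t := ht ▸ getD_mono Hs (by omega) hzlt
          have hlt1 : toLex (s.getD k (0, 0)) < toLex t :=
            lt_of_le_of_ne hle1 (fun he => hkne (toLex.injective he))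
          have hle2 : toLex t ≤ toLex (s.getD j (0, 0)) := ht ▸ getD_mono Hs (by omega) hjlen
          intro he
          rw [he] at hlt1
          exact absurd hle2 (not_le_of_gt hlt1)
        · subst hkz
          exact fun he => hstop (ht ▸ he.symm)
        · have : s.getD k (0, 0) = t := runEnd_eq_self s z (z + 1) k (by omega) (by omega)
          rw [this]
          exact fun he => hstop he.symm
      rw [ih j (acc ++ [(t.1, (j : Int) - (z : Int), t.2)]) (by omega) (by omega) hbj]
      conv_rhs => rw [bLoop, dif_pos hzlt]
      simp [← hj, ht, List.getD, List.append_assoc]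

-- ===== VERDICT (by name: the statement is the Claim_ definition above) =====
theorem multi_spec : Claim_equal_multi := by
  intro g _
  unfold Spec_multi multi multi_alt
  rw [sorted2_eq_sorted_lex]
  set s := PySem.List.sorted g (fun x => toLex x) with hs
  have Hs : s.Pairwise (fun a b => toLex a ≤ toLex b) := PySem.List.sorted_pairwise g _
  have h := outer_eq s Hs s.length 0 [] (by omega) (by omega) (by intro _ k hk; omega)
  simp only [Nat.cast_zero] at h
  simp only [PySem.List.len_eq]
  rw [h]
  simp
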